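-- pv_equiv track=rewrite | github.com/357357user357357/hft | p_adic.py | _normalize_coeffs
-- ===== SOURCE A (Python) =====
-- from typing import List, Optional, Tuple
--
-- def _normalize_coeffs(coeffs: List[int], p: int, n: int) -> List[int]:
--     """Normalize coefficients to [0, p) range with carry."""
--     result = [0] * n
--
--     for i, c in enumerate(coeffs):
--         carry = c
--         j = i
--         while j < n and carry != 0:
--             result[j] += carry
--             carry = result[j] // p
--             result[j] %= p
--             j += 1
--
--     return result
-- ===== SOURCE B (Python) =====
-- def _normalize_coeffs(coeffs, p, n):
--     """Normalize coefficients to [0, p) range with carry."""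
--     if n <= 0:
--         return []
--     digits = coeffs[:n] + [0] * (n - len(coeffs))
--     out = []
--     carry = 0
--     for c in digits:
--         t = c + carry
--         out.append(t % p)
--         carry = t // p
--     return out
-- ===== Notes on version B (the rewrite author's own statement) =====
-- stated objective: faster
-- what changed: Instead of propagating a carry chain through the digit array separately for every coefficient (nested while loop), B lays the first n coefficients out once and normalizes them with a single left-to-right divmod carry sweep.
-- outside the precondition, e.g. on _normalize_coeffs([0, 0], 0, 2): A returns [0, 0], B raises ZeroDivisionError
import Mathlib
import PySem

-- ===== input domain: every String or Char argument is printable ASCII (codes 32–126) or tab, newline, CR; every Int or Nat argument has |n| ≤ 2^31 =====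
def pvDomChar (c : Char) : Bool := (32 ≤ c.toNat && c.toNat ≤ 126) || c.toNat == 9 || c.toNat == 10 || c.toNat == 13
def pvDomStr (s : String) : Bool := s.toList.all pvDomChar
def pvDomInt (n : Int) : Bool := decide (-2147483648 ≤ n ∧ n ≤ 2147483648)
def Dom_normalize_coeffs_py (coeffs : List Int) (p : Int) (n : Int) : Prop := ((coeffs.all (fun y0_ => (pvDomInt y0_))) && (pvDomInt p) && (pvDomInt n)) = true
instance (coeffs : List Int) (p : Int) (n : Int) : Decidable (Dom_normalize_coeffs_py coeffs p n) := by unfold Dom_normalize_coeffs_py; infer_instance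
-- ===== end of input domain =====

-- B replaces A's per-coefficient carry-propagation (inner while loop for each coefficient)
-- by one padded coefficient list and a single left-to-right divmod carry sweep (objective: faster).


-- ===== PORT A =====
-- A's inner while loop: while j < n and carry != 0: result[j] += carry; carry = result[j] // p; result[j] %= p; j += 1
def pvInnerA (p n : Int) (result : List Int) (j carry : Int) : List Int :=
  if h : j < n ∧ carry ≠ 0 then
    let v := PySem.List.pyGetD result j 0 + carry        -- result[j] += carry (value written below)
    let r1 := PySem.List.pySetD result j v
    let r2 := PySem.List.pySetD r1 j (PySem.Int.mod v p) -- result[j] %= p  (carry = v // p)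
    pvInnerA p n r2 (j + 1) (PySem.Int.floordiv v p)
  else result
termination_by (n - j).toNat
decreasing_by omega

def normalize_coeffs_py (coeffs : List Int) (p : Int) (n : Int) : List Int :=
  -- result = [0] * n; for i, c in enumerate(coeffs): <inner while loop>
  (PySem.List.enumerate coeffs).foldl (fun r ic => pvInnerA p n r ic.1 ic.2)
    (List.replicate n.toNat 0)

-- ===== PORT B =====
def normalize_coeffs_py_alt (coeffs : List Int) (p : Int) (n : Int) : List Int :=
  if n ≤ 0 then []
  else
    -- digits = coeffs[:n] + [0] * (n - len(coeffs))
    let ds := PySem.List.slice coeffs none (some n) ++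
              List.replicate (n - (coeffs.length : Int)).toNat 0
    -- out = []; carry = 0; for c in digits: t = c + carry; out.append(t % p); carry = t // p
    (ds.foldl (fun (st : List Int × Int) c =>
        (st.1 ++ [PySem.Int.mod (c + st.2) p], PySem.Int.floordiv (c + st.2) p)) ([], 0)).1

-- ===== PRECONDITION & SPEC =====
-- Pre_ excludes p = 0 (division by zero): A raises ZeroDivisionError whenever one of the first n
-- coefficients is nonzero, and on the remaining degenerate all-zero inputs B raises while A returns [0]*n.
def Pre_normalize_coeffs_py (coeffs : List Int) (p : Int) (n : Int) : Prop := p ≠ 0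
instance (coeffs : List Int) (p : Int) (n : Int) : Decidable (Pre_normalize_coeffs_py coeffs p n) := by unfold Pre_normalize_coeffs_py; infer_instance

def pvWitness_normalize_coeffs_py : List Int × Int × Int := ([3, 5, -2], 2, 6)

def Spec_normalize_coeffs_py (coeffs : List Int) (p : Int) (n : Int) (out : List Int) : Prop := out = normalize_coeffs_py_alt coeffs p n
instance (coeffs : List Int) (p : Int) (n : Int) (out : List Int) : Decidable (Spec_normalize_coeffs_py coeffs p n out) := by unfold Spec_normalize_coeffs_py; infer_instance

-- ===== CLAIM (what is proved, stated in full; the proofs are below) =====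
def Claim_equal_normalize_coeffs_py : Prop := ∀ (coeffs : List Int) (p : Int) (n : Int), Dom_normalize_coeffs_py coeffs p n → Pre_normalize_coeffs_py coeffs p n → Spec_normalize_coeffs_py coeffs p n (normalize_coeffs_py coeffs p n)

-- ===== LEMMAS AND PROOFS =====

-- n base-p digits of s, least significant first, Python floor-division semantics.
def pvDigits (p : Int) : Nat → Int → List Int
  | 0, _ => []
  | m + 1, s => PySem.Int.mod s p :: pvDigits p m (PySem.Int.floordiv s p)

-- value of a coefficient list at base p
def pvVal (p : Int) (xs : List Int) : Int := xs.foldr (fun c acc => c + acc * p) 0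

-- structural image of A's inner while loop on the suffix from position j
def pvProp (p : Int) : List Int → Int → List Int
  | [], _ => []
  | c :: rest, carry =>
      if carry = 0 then c :: rest
      else PySem.Int.mod (c + carry) p :: pvProp p rest (PySem.Int.floordiv (c + carry) p)

-- structural image of B's sweep loop
def pvSweep (p : Int) : List Int → Int → List Int
  | [], _ => []
  | c :: rest, carry =>
      PySem.Int.mod (c + carry) p :: pvSweep p rest (PySem.Int.floordiv (c + carry) p)

-- k-fold floor division
def pvFd (p : Int) : Int → Nat → Int
  | s, 0 => s
  | s, k + 1 => pvFd p (PySem.Int.floordiv s p) k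

theorem pv_mod_shift (p a k : Int) :
    PySem.Int.mod (a + k * p) p = PySem.Int.mod a p := by
  simp [PySem.Int.mod, Int.add_mul_fmod_self_right]

theorem pv_fdiv_shift (p a k : Int) (hp : p ≠ 0) :
    PySem.Int.floordiv (a + k * p) p = PySem.Int.floordiv a p + k := by
  simp [PySem.Int.floordiv, Int.add_mul_fdiv_right _ _ hp]

theorem pv_digits_length (p : Int) (m : Nat) (s : Int) : (pvDigits p m s).length = m := by
  induction m generalizing s with
  | zero => rfl
  | succ m ih => simp [pvDigits, ih]

theorem pv_digits_zero (p : Int) (m : Nat) : pvDigits p m 0 = List.replicate m 0 := by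
  induction m with
  | zero => rfl
  | succ m ih =>
      simp [pvDigits, PySem.Int.mod, PySem.Int.floordiv, Int.zero_fmod, Int.zero_fdiv, ih,
        List.replicate_succ]

theorem pv_sweep_eq_digits (p : Int) (hp : p ≠ 0) :
    ∀ (xs : List Int) (carry : Int),
      pvSweep p xs carry = pvDigits p xs.length (pvVal p xs + carry) := by
  intro xs
  induction xs with
  | nil => intro carry; rfl
  | cons c rest ih =>
      intro carry
      have hval : pvVal p (c :: rest) + carry = (c + carry) + pvVal p rest * p := by
        simp [pvVal]; ring
      simp only [pvSweep, List.length_cons, pvDigits, hval, pv_mod_shift,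
        pv_fdiv_shift p (c + carry) (pvVal p rest) hp, ih]
      rw [add_comm (pvVal p rest) (PySem.Int.floordiv (c + carry) p)]

theorem pv_foldl_bridge (p : Int) :
    ∀ (xs : List Int) (carry : Int) (acc : List Int),
      (xs.foldl (fun (st : List Int × Int) c =>
        (st.1 ++ [PySem.Int.mod (c + st.2) p], PySem.Int.floordiv (c + st.2) p)) (acc, carry)).1
      = acc ++ pvSweep p xs carry := by
  intro xs
  induction xs with
  | nil => intro carry acc; simp [pvSweep]
  | cons c rest ih =>
      intro carry acc
      simp only [List.foldl_cons, ih, pvSweep, List.append_assoc, List.singleton_append]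

theorem pv_prop_zero (p : Int) (xs : List Int) : pvProp p xs 0 = xs := by
  cases xs <;> simp [pvProp]

theorem pv_prop_digits (p : Int) (hp : p ≠ 0) :
    ∀ (m : Nat) (s carry : Int),
      pvProp p (pvDigits p m s) carry = pvDigits p m (s + carry) := by
  intro m
  induction m with
  | zero => intro s carry; rfl
  | succ m ih =>
      intro s carry
      by_cases hc : carry = 0
      · simp [hc, pv_prop_zero]
      · have hdec := PySem.Int.floordiv_mul_add_mod s p
        have hrw : PySem.Int.mod s p + carry = (s + carry) + (-(PySem.Int.floordiv s p)) * p := by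
          linarith
        simp only [pvDigits]
        rw [show pvProp p (PySem.Int.mod s p :: pvDigits p m (PySem.Int.floordiv s p)) carry
            = PySem.Int.mod (PySem.Int.mod s p + carry) p ::
              pvProp p (pvDigits p m (PySem.Int.floordiv s p))
                (PySem.Int.floordiv (PySem.Int.mod s p + carry) p) from by
          simp [pvProp, hc]]
        rw [ih, hrw, pv_mod_shift,
          pv_fdiv_shift p (s + carry) (-(PySem.Int.floordiv s p)) hp]
        have harg : PySem.Int.floordiv s p + (PySem.Int.floordiv (s + carry) p
            + -(PySem.Int.floordiv s p)) = PySem.Int.floordiv (s + carry) p := by ring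
        rw [harg]

theorem pv_digits_mod_pow (p : Int) (hp : p ≠ 0) :
    ∀ (m : Nat) (s t : Int), pvDigits p m (s + t * p ^ m) = pvDigits p m s := by
  intro m
  induction m with
  | zero => intro s t; rfl
  | succ m ih =>
      intro s t
      have h1 : s + t * p ^ (m + 1) = s + (t * p ^ m) * p := by ring
      simp only [pvDigits, h1, pv_mod_shift, pv_fdiv_shift p s (t * p ^ m) hp, ih]

theorem pv_take_digits (p : Int) (hp : p ≠ 0) :
    ∀ (k m : Nat) (s c : Int),
      (pvDigits p m (s + c * p ^ k)).take k = (pvDigits p m s).take k := by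
  intro k
  induction k with
  | zero => intro m s c; simp
  | succ k ih =>
      intro m s c
      cases m with
      | zero => rfl
      | succ m =>
          have h1 : s + c * p ^ (k + 1) = s + (c * p ^ k) * p := by ring
          simp only [pvDigits, h1, pv_mod_shift, pv_fdiv_shift p s (c * p ^ k) hp,
            List.take_succ_cons, ih]

theorem pv_drop_digits (p : Int) :
    ∀ (k m : Nat) (s : Int),
      (pvDigits p m s).drop k = pvDigits p (m - k) (pvFd p s k) := by
  intro k
  induction k with
  | zero => intro m s; simp [pvFd]
  | succ k ih =>
      intro m s
      cases m with
      | zero => simp [pvDigits]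
      | succ m => simp only [pvDigits, List.drop_succ_cons, ih, pvFd, Nat.succ_sub_succ]

theorem pv_fd_shift (p : Int) (hp : p ≠ 0) :
    ∀ (k : Nat) (s c : Int), pvFd p (s + c * p ^ k) k = pvFd p s k + c := by
  intro k
  induction k with
  | zero => intro s c; simp [pvFd]
  | succ k ih =>
      intro s c
      have h1 : s + c * p ^ (k + 1) = s + (c * p ^ k) * p := by ring
      simp only [pvFd, h1, pv_fdiv_shift p s (c * p ^ k) hp, ih]

-- A's inner loop, reduced to take/prop/drop on the list
theorem pv_innerA_eq (p n : Int) :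
    ∀ (fuel : Nat) (j carry : Int) (result : List Int),
      (n - j).toNat = fuel → 0 ≤ j → result.length = n.toNat →
      pvInnerA p n result j carry
        = result.take j.toNat ++ pvProp p (result.drop j.toNat) carry := by
  intro fuel
  induction fuel with
  | zero =>
      intro j carry result hfuel hj hlen
      have hjn : ¬ (j < n) := by omega
      rw [pvInnerA, dif_neg (by tauto)]
      have hge : result.length ≤ j.toNat := by omega
      rw [List.drop_eq_nil_of_le hge]
      rw [show pvProp p ([] : List Int) carry = [] from rfl,
        List.append_nil, List.take_of_length_le hge]
  | succ fuel ih =>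
      intro j carry result hfuel hj hlen
      by_cases hcond : j < n ∧ carry ≠ 0
      · obtain ⟨hjn, hc⟩ := hcond
        have hjlt : j.toNat < result.length := by omega
        rw [pvInnerA, dif_pos ⟨hjn, hc⟩]
        simp only [PySem.List.pyGetD_eq_getElem result 0 hj (by omega : j < (result.length : Int)),
          PySem.List.pySetD_of_nonneg _ _ hj, List.set_set]
        set v := result[j.toNat] + carry with hv
        rw [ih (j + 1) (PySem.Int.floordiv v p) (result.set j.toNat (PySem.Int.mod v p))
          (by omega) (by omega) (by simp [hlen])]
        have hjp1 : (j + 1).toNat = j.toNat + 1 := by omega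
        rw [hjp1]
        -- take (j+1) of the set list
        have htake : (result.set j.toNat (PySem.Int.mod v p)).take (j.toNat + 1)
            = result.take j.toNat ++ [PySem.Int.mod v p] := by
          rw [List.take_set, List.take_add_one]
          have h2 : result[j.toNat]? = some result[j.toNat] := List.getElem?_eq_getElem hjlt
          rw [h2]
          rw [List.set_append_right _ _ (by simp [List.length_take])]
          simp [List.length_take, Nat.min_eq_left (Nat.le_of_lt hjlt)]
        have hdrop : (result.set j.toNat (PySem.Int.mod v p)).drop (j.toNat + 1)
            = result.drop (j.toNat + 1) := by
          rw [List.drop_set]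
          simp
        rw [htake, hdrop]
        -- right-hand side
        rw [List.drop_eq_getElem_cons hjlt]
        rw [show pvProp p (result[j.toNat] :: result.drop (j.toNat + 1)) carry
            = PySem.Int.mod v p :: pvProp p (result.drop (j.toNat + 1)) (PySem.Int.floordiv v p) by
          simp [pvProp, hc, hv]]
        simp
      · rw [pvInnerA, dif_neg hcond]
        rcases not_and_or.mp hcond with hjn | hc
        · have hge : result.length ≤ j.toNat := by omega
          rw [List.drop_eq_nil_of_le hge]
          rw [show pvProp p ([] : List Int) carry = [] from rfl,
            List.append_nil, List.take_of_length_le hge]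
        · have hc0 : carry = 0 := by tauto
          rw [hc0, pv_prop_zero, List.take_append_drop]

-- one outer-loop step on a digit state
theorem pv_innerA_digits (p n : Int) (hp : p ≠ 0) (i carry s : Int) (hi : 0 ≤ i) :
    pvInnerA p n (pvDigits p n.toNat s) i carry
      = pvDigits p n.toNat (s + carry * p ^ i.toNat) := by
  rw [pv_innerA_eq p n ((n - i).toNat) i carry _ rfl hi (pv_digits_length p n.toNat s)]
  rw [pv_drop_digits, pv_prop_digits p hp]
  conv_rhs => rw [← List.take_append_drop i.toNat (pvDigits p n.toNat (s + carry * p ^ i.toNat))]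
  rw [pv_take_digits p hp, pv_drop_digits, pv_fd_shift p hp]

-- outer loop invariant
theorem pv_outer (p n : Int) (hp : p ≠ 0) :
    ∀ (cs : List Int) (i s : Int), 0 ≤ i →
      (PySem.List.enumerate cs i).foldl (fun r ic => pvInnerA p n r ic.1 ic.2)
          (pvDigits p n.toNat s)
        = pvDigits p n.toNat (s + pvVal p cs * p ^ i.toNat) := by
  intro cs
  induction cs with
  | nil => intro i s hi; simp [PySem.List.enumerate_nil, pvVal]
  | cons c rest ih =>
      intro i s hi
      rw [PySem.List.enumerate_cons, List.foldl_cons]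
      rw [show pvInnerA p n (pvDigits p n.toNat s) i c
          = pvDigits p n.toNat (s + c * p ^ i.toNat) from pv_innerA_digits p n hp i c s hi]
      rw [ih (i + 1) _ (by omega)]
      congr 1
      have h1 : (i + 1).toNat = i.toNat + 1 := by omega
      rw [h1]
      simp [pvVal]
      ring

theorem pv_A_char (coeffs : List Int) (p n : Int) (hp : p ≠ 0) :
    normalize_coeffs_py coeffs p n = pvDigits p n.toNat (pvVal p coeffs) := by
  unfold normalize_coeffs_py
  rw [← pv_digits_zero p n.toNat, pv_outer p n hp coeffs 0 0 le_rfl]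
  simp

theorem pv_val_append (p : Int) :
    ∀ (xs ys : List Int), pvVal p (xs ++ ys) = pvVal p xs + p ^ xs.length * pvVal p ys := by
  intro xs ys
  induction xs with
  | nil => simp [pvVal]
  | cons c rest ih =>
      simp only [List.cons_append, pvVal, List.foldr_cons, List.length_cons] at *
      rw [ih]; ring

theorem pv_val_replicate_zero (p : Int) (k : Nat) : pvVal p (List.replicate k 0) = 0 := by
  induction k with
  | zero => rfl
  | succ k ih => simp [List.replicate_succ, pvVal] at *; simp [ih]

theorem pv_B_char (coeffs : List Int) (p n : Int) (hp : p ≠ 0) :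
    normalize_coeffs_py_alt coeffs p n = pvDigits p n.toNat (pvVal p coeffs) := by
  unfold normalize_coeffs_py_alt
  by_cases hn : n ≤ 0
  · rw [if_pos hn]
    have : n.toNat = 0 := by omega
    rw [this]; rfl
  · rw [if_neg hn]
    have hn0 : 0 ≤ n := by omega
    rw [PySem.List.slice_to coeffs hn0]
    set ds := coeffs.take n.toNat ++ List.replicate (n - (coeffs.length : Int)).toNat 0 with hds
    rw [pv_foldl_bridge, List.nil_append, pv_sweep_eq_digits p hp]
    have hlen : ds.length = n.toNat := by
      simp [hds, List.length_take]
      omega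
    have hval : pvVal p ds = pvVal p (coeffs.take n.toNat) := by
      rw [hds, pv_val_append, pv_val_replicate_zero]; ring
    rw [hlen, hval, add_zero]
    by_cases hle : coeffs.length ≤ n.toNat
    · rw [List.take_of_length_le hle]
    · have hlt : n.toNat < coeffs.length := by omega
      conv_rhs => rw [← List.take_append_drop n.toNat coeffs]
      rw [pv_val_append, List.length_take, Nat.min_eq_left (Nat.le_of_lt hlt)]
      rw [show pvVal p (coeffs.take n.toNat) + p ^ n.toNat * pvVal p (coeffs.drop n.toNat)
          = pvVal p (coeffs.take n.toNat) + pvVal p (coeffs.drop n.toNat) * p ^ n.toNat by ring]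
      rw [pv_digits_mod_pow p hp]

-- ===== VERDICT (by name: the statement is the Claim_ definition above) =====
theorem normalize_coeffs_py_spec : Claim_equal_normalize_coeffs_py := by
  intro coeffs p n _ hp
  unfold Spec_normalize_coeffs_py
  rw [pv_A_char coeffs p n hp, pv_B_char coeffs p n hp]
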